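-- pv_equiv track=rewrite | github.com/enricotomasi/GeeksforGeeks_problems | Easy/ADA Noise.py | updateString
-- ===== SOURCE A (Python) =====
-- def updateString(S):
--     # code here
--     n = len(S)
--     i = 0
--
--     signal = ""
--     noise = ""
--
--     while i < n:
--         if S[i] == 'a' and i+2 < n and S[i+1] == "d" and S[i+2] == "a":
--             noise += "ada"
--             i += 3
--
--             while i+1 < n and S[i] == "d" and S[i+1] == "a":
--                 noise += "da"
--                 i += 2
--
--         else:
--             signal += S[i]
--             i +=1
--
--
--     ans = signal + noise
--
--     return ans
-- ===== SOURCE B (Python) =====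
-- def updateString(S):
--     sig_parts = []
--     noise_parts = []
--     i = 0
--     while True:
--         j = S.find("ada", i)
--         if j == -1:
--             sig_parts.append(S[i:])
--             break
--         sig_parts.append(S[i:j])
--         k = j + 3
--         while S.startswith("da", k):
--             k += 2
--         noise_parts.append(S[j:k])
--         i = k
--     return "".join(sig_parts) + "".join(noise_parts)
-- ===== Notes on version B (the rewrite author's own statement) =====
-- stated objective: faster
-- what changed: Replaces A's per-character while-loop index machine (with quadratic string concatenation) with a substring-search scan: repeatedly jump to the next noise occurrence with str.find, slice the whole gap into signal at once, extend the match over trailing pairs with startswith, and join the collected pieces at the end.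
import Mathlib
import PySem

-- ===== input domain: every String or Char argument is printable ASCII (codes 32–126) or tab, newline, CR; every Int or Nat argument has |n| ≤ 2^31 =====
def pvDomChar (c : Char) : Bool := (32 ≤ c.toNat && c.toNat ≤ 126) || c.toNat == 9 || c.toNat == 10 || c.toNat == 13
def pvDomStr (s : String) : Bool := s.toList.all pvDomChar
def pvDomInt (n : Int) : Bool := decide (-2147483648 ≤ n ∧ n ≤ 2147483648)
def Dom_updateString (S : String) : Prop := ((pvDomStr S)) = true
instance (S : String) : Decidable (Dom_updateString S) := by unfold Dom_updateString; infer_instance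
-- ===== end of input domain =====

-- B replaces A's per-character index machine (quadratic string +=) by a substring-search scan
-- (find the next noise occurrence, slice the gap, extend over trailing pairs); objective: faster.

-- ===== PORT A =====
-- inner while of A: consume trailing two-char pairs, appending them to noise
def adaInner : List Char → List Char → List Char × List Char
  | 'd' :: 'a' :: rest, noi => adaInner rest (noi ++ ['d', 'a'])
  | rest, noi => (rest, noi)

theorem adaInner_fst_length (l noi : List Char) : (adaInner l noi).1.length ≤ l.length := by
  fun_induction adaInner l noi <;> simp_all <;> omega

-- outer while of A: scan char by char; on a noise start consume it plus the trailing pairs into noise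
def adaLoop : List Char → List Char → List Char → List Char × List Char
  | 'a' :: 'd' :: 'a' :: rest, sig, noi =>
      adaLoop (adaInner rest (noi ++ ['a', 'd', 'a'])).1 sig (adaInner rest (noi ++ ['a', 'd', 'a'])).2
  | c :: rest, sig, noi => adaLoop rest (sig ++ [c]) noi
  | [], sig, noi => (sig, noi)
termination_by cs _ _ => cs.length
decreasing_by
  · have := adaInner_fst_length rest (noi ++ ['a', 'd', 'a'])
    simp; omega
  · simp

def updateString (S : String) : String :=
  let p := adaLoop S.toList [] []
  String.mk (p.1 ++ p.2)

-- ===== PORT B =====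
-- S.find("ada", i): the gap before the first noise occurrence and the remainder after it, or none
def findAda : List Char → Option (List Char × List Char)
  | 'a' :: 'd' :: 'a' :: rest => some ([], rest)
  | c :: cs => (findAda cs).map (fun p => (c :: p.1, p.2))
  | [] => none

theorem findAda_some_length {cs gap rest : List Char} (h : findAda cs = some (gap, rest)) :
    rest.length < cs.length := by
  fun_induction findAda cs generalizing gap rest <;> simp_all
  · omega
  · rename_i ih hgr
    obtain ⟨a, hfa, -⟩ := h
    exact Nat.le_of_lt (hgr hfa)

-- while S.startswith("da", k): count the trailing pairs and return the remainder
def daSpan : List Char → Nat × List Char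
  | 'd' :: 'a' :: rest => ((daSpan rest).1 + 1, (daSpan rest).2)
  | rest => (0, rest)

theorem daSpan_snd_length (l : List Char) : (daSpan l).2.length ≤ l.length := by
  fun_induction daSpan l <;> simp_all <;> omega

-- main loop of Source B: jump to the next noise occurrence with find, slice the gap into signal;
-- the noise slice S[j:k] is built here explicitly from the counted pairs
def bLoop (cs sig noi : List Char) : List Char :=
  match h : findAda cs with
  | none => sig ++ cs ++ noi
  | some (gap, rest) =>
      bLoop (daSpan rest).2 (sig ++ gap)
        (noi ++ ['a', 'd', 'a'] ++ (List.replicate (daSpan rest).1 ['d', 'a']).flatten)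
termination_by cs.length
decreasing_by
  have h1 := daSpan_snd_length rest
  have h2 := findAda_some_length h
  omega

def updateString_alt (S : String) : String := String.mk (bLoop S.toList [] [])

-- ===== PRECONDITION & SPEC =====
def Spec_updateString (S : String) (out : String) : Prop := out = updateString_alt S
instance (S : String) (out : String) : Decidable (Spec_updateString S out) := by unfold Spec_updateString; infer_instance

-- ===== CLAIM (what is proved, stated in full; the proofs are below) =====
def Claim_equal_updateString : Prop := ∀ (S : String), Dom_updateString S → Spec_updateString S (updateString S)

-- ===== LEMMAS AND PROOFS =====

-- A's inner while equals daSpan: same remainder, noise grows by the counted pairs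
theorem adaInner_eq_daSpan (l noi : List Char) :
    adaInner l noi = ((daSpan l).2, noi ++ (List.replicate (daSpan l).1 ['d', 'a']).flatten) := by
  fun_induction adaInner l noi <;> simp_all [daSpan, List.replicate_succ]

-- if there is no noise occurrence, A's loop moves everything into signal
theorem adaLoop_none {cs : List Char} (h : findAda cs = none) (sig noi : List Char) :
    adaLoop cs sig noi = (sig ++ cs, noi) := by
  fun_induction adaLoop cs sig noi <;> simp_all [findAda]

-- one "find" step of B corresponds to the gap's worth of single-char steps plus one noise burst of A
theorem adaLoop_some {cs gap rest : List Char} (h : findAda cs = some (gap, rest))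
    (sig noi : List Char) :
    adaLoop cs sig noi =
      adaLoop (daSpan rest).2 (sig ++ gap)
        (noi ++ ['a', 'd', 'a'] ++ (List.replicate (daSpan rest).1 ['d', 'a']).flatten) := by
  fun_induction adaLoop cs sig noi generalizing gap rest <;> simp_all [findAda]
  · obtain ⟨h1, h2⟩ := h
    subst h1 h2
    rw [adaInner_eq_daSpan]
    simp
  · obtain ⟨a, hfa, hg⟩ := h
    subst hg
    rename_i ih
    exact ih hfa

theorem bLoop_eq (cs sig noi : List Char) :
    bLoop cs sig noi = (adaLoop cs sig noi).1 ++ (adaLoop cs sig noi).2 := by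
  fun_induction bLoop cs sig noi
  · rename_i h
    rw [adaLoop_none h]
  · rename_i gap rest h ih
    rw [adaLoop_some h]
    exact ih

-- ===== VERDICT (by name: the statement is the Claim_ definition above) =====
theorem updateString_spec : Claim_equal_updateString := by
  intro S _
  unfold Spec_updateString updateString updateString_alt
  rw [bLoop_eq]
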